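-- pv_equiv track=rewrite | github.com/xen0bit/detonate | src/detonate/mapping/patterns.py | _matches_classic_injection
-- ===== SOURCE A (Python) =====
-- def _matches_classic_injection(sequence: list[str]) -> bool:
--     """Check if sequence matches classic injection pattern."""
--     required = ["VirtualAllocEx", "WriteProcessMemory", "CreateRemoteThread"]
--
--     # Check if all required APIs are present in order
--     indices = []
--     for api in required:
--         try:
--             idx = sequence.index(api)
--             indices.append(idx)
--         except ValueError:
--             return False
--
--     # Verify order
--     return indices == sorted(indices)
-- ===== SOURCE B (Python) =====
-- def _matches_classic_injection(sequence: list[str]) -> bool: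
--     """Check if sequence matches classic injection pattern (single pass)."""
--     seen_alloc = seen_write = seen_create = False
--     for api in sequence:
--         if api == "VirtualAllocEx":
--             seen_alloc = True
--         elif api == "WriteProcessMemory" and not seen_write:
--             if not seen_alloc:
--                 return False
--             seen_write = True
--         elif api == "CreateRemoteThread" and not seen_create:
--             if not seen_write:
--                 return False
--             seen_create = True
--     return seen_alloc and seen_write and seen_create
-- ===== Notes on version B (the rewrite author's own statement) =====
-- stated objective: alternative
-- what changed: Replaces three separate list.index scans plus a sort-and-compare on the collected indices with a single pass over the sequence that tracks seen-flags for the three APIs and fails as soon as a first occurrence is out of order.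
import Mathlib
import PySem

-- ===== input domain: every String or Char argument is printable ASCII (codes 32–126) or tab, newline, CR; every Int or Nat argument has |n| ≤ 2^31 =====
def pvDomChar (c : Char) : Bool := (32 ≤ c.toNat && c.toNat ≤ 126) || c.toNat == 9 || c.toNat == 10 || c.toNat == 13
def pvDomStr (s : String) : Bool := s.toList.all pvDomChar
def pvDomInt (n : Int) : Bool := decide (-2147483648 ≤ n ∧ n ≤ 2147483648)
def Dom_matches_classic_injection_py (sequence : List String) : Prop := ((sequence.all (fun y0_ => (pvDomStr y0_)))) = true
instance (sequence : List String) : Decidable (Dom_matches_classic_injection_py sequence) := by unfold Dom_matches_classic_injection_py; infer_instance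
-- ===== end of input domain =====

-- B replaces A's three list.index scans plus sort-and-compare by one pass with seen-flags
-- that fails at the first out-of-order first occurrence (objective: alternative single-pass algorithm).

-- ===== PORT A =====
-- A's 'for api in required' loop: collect sequence.index(api); ValueError (index? = none) returns False early
def pvCollectIndices (sequence : List String) : List String → List Int → Option (List Int)
  | [], acc => some acc
  | api :: rest, acc =>
    match PySem.List.index? sequence api with
    | some idx => pvCollectIndices sequence rest (acc ++ [(idx : Int)])
    | none => none

def matches_classic_injection_py (sequence : List String) : Bool :=
  match pvCollectIndices sequence ["VirtualAllocEx", "WriteProcessMemory", "CreateRemoteThread"] [] with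
  | none => false
  | some indices => indices == PySem.List.sorted indices (fun x => x)

-- ===== PORT B =====
-- the single pass of Source B, carrying the three seen-flags
def pvScan : List String → Bool → Bool → Bool → Bool
  | [], a, w, c => a && w && c
  | api :: rest, a, w, c =>
    if api = "VirtualAllocEx" then pvScan rest true w c
    else if api = "WriteProcessMemory" ∧ !w then
      if !a then false else pvScan rest a true c
    else if api = "CreateRemoteThread" ∧ !c then
      if !w then false else pvScan rest a w true
    else pvScan rest a w c

def matches_classic_injection_py_alt (sequence : List String) : Bool :=
  pvScan sequence false false false

-- ===== PRECONDITION & SPEC =====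
def Spec_matches_classic_injection_py (sequence : List String) (out : Bool) : Prop := out = matches_classic_injection_py_alt sequence
instance (sequence : List String) (out : Bool) : Decidable (Spec_matches_classic_injection_py sequence out) := by unfold Spec_matches_classic_injection_py; infer_instance

-- ===== CLAIM (what is proved, stated in full; the proofs are below) =====
def Claim_equal_matches_classic_injection_py : Prop := ∀ (sequence : List String), Dom_matches_classic_injection_py sequence → Spec_matches_classic_injection_py sequence (matches_classic_injection_py sequence)

-- ===== LEMMAS AND PROOFS =====

-- state (true,true,true): always succeeds
theorem pvScan_ttt (xs : List String) : pvScan xs true true true = true := by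
  induction xs with
  | nil => rfl
  | cons x xs ih => simp only [pvScan]; split_ifs <;> simp_all

-- state (true,true,false): succeeds iff CreateRemoteThread occurs
theorem pvScan_ttf (xs : List String) :
    pvScan xs true true false = decide ("CreateRemoteThread" ∈ xs) := by
  induction xs with
  | nil => rfl
  | cons x xs ih =>
    by_cases hc : x = "CreateRemoteThread"
    · subst hc; simp [pvScan, pvScan_ttt]
    · simp [pvScan, ih, List.mem_cons, eq_comm, hc]

-- state (true,false,false): first WriteProcessMemory exists and precedes first CreateRemoteThread
theorem pvScan_tff (xs : List String) :
    pvScan xs true false false =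
      (match PySem.List.index? xs "WriteProcessMemory", PySem.List.index? xs "CreateRemoteThread" with
       | some j, some k => decide (j < k)
       | _, _ => false) := by
  induction xs with
  | nil => rfl
  | cons x xs ih =>
    by_cases hw : x = "WriteProcessMemory"
    · subst hw
      rw [PySem.List.index?_cons_self,
          PySem.List.index?_cons_of_ne xs (by decide : ("WriteProcessMemory" : String) ≠ "CreateRemoteThread")]
      rcases hC : PySem.List.index? xs "CreateRemoteThread" with _ | k
      · simp [pvScan, pvScan_ttf, (PySem.List.index?_eq_none_iff xs "CreateRemoteThread").mp hC]
      · have hmem : "CreateRemoteThread" ∈ xs := (PySem.List.index?_isSome_iff xs _).mp (by rw [hC]; rfl)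
        simp_all [pvScan, pvScan_ttf]
    · by_cases hc : x = "CreateRemoteThread"
      · subst hc
        rw [PySem.List.index?_cons_self,
            PySem.List.index?_cons_of_ne xs (by decide : ("CreateRemoteThread" : String) ≠ "WriteProcessMemory")]
        rcases PySem.List.index? xs "WriteProcessMemory" with _ | j <;> simp [pvScan]
      · rw [PySem.List.index?_cons_of_ne xs hw, PySem.List.index?_cons_of_ne xs hc]
        by_cases hv : x = "VirtualAllocEx"
        · subst hv
          rcases hW : PySem.List.index? xs "WriteProcessMemory" with _ | j <;>
            rcases hC : PySem.List.index? xs "CreateRemoteThread" with _ | k <;>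
              (simp only [PySem.List.index?_eq_idxOf?] at ih hW hC;
               simp [pvScan, ih, hW, hC])
        · rcases hW : PySem.List.index? xs "WriteProcessMemory" with _ | j <;>
            rcases hC : PySem.List.index? xs "CreateRemoteThread" with _ | k <;>
              (simp only [PySem.List.index?_eq_idxOf?] at ih hW hC;
               simp [pvScan, ih, hW, hC, hv, hw, hc])

-- state (false,false,false): the three first occurrences exist and are strictly increasing
theorem pvScan_fff (xs : List String) :
    pvScan xs false false false =
      (match PySem.List.index? xs "VirtualAllocEx", PySem.List.index? xs "WriteProcessMemory",
             PySem.List.index? xs "CreateRemoteThread" with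
       | some i, some j, some k => decide (i < j ∧ j < k)
       | _, _, _ => false) := by
  induction xs with
  | nil => rfl
  | cons x xs ih =>
    by_cases hv : x = "VirtualAllocEx"
    · subst hv
      rw [PySem.List.index?_cons_self,
          PySem.List.index?_cons_of_ne xs (by decide : ("VirtualAllocEx" : String) ≠ "WriteProcessMemory"),
          PySem.List.index?_cons_of_ne xs (by decide : ("VirtualAllocEx" : String) ≠ "CreateRemoteThread")]
      rcases hW : PySem.List.index? xs "WriteProcessMemory" with _ | j <;>
        rcases hC : PySem.List.index? xs "CreateRemoteThread" with _ | k <;>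
          (simp only [PySem.List.index?_eq_idxOf?] at hW hC;
           simp [pvScan, pvScan_tff, hW, hC])
    · by_cases hw : x = "WriteProcessMemory"
      · subst hw
        rw [PySem.List.index?_cons_of_ne xs (by decide : ("WriteProcessMemory" : String) ≠ "VirtualAllocEx"),
            PySem.List.index?_cons_self,
            PySem.List.index?_cons_of_ne xs (by decide : ("WriteProcessMemory" : String) ≠ "CreateRemoteThread")]
        rcases PySem.List.index? xs "VirtualAllocEx" with _ | i <;>
          rcases PySem.List.index? xs "CreateRemoteThread" with _ | k <;> simp [pvScan]
      · by_cases hc : x = "CreateRemoteThread"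
        · subst hc
          rw [PySem.List.index?_cons_of_ne xs (by decide : ("CreateRemoteThread" : String) ≠ "VirtualAllocEx"),
              PySem.List.index?_cons_of_ne xs (by decide : ("CreateRemoteThread" : String) ≠ "WriteProcessMemory"),
              PySem.List.index?_cons_self]
          rcases PySem.List.index? xs "VirtualAllocEx" with _ | i <;>
            rcases PySem.List.index? xs "WriteProcessMemory" with _ | j <;> simp [pvScan]
        · rw [PySem.List.index?_cons_of_ne xs hv, PySem.List.index?_cons_of_ne xs hw,
              PySem.List.index?_cons_of_ne xs hc]
          rcases hV : PySem.List.index? xs "VirtualAllocEx" with _ | i <;>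
            rcases hW : PySem.List.index? xs "WriteProcessMemory" with _ | j <;>
              rcases hC : PySem.List.index? xs "CreateRemoteThread" with _ | k <;>
                (simp only [PySem.List.index?_eq_idxOf?] at ih hV hW hC;
                 simp [pvScan, ih, hV, hW, hC, hv, hw, hc])

-- distinct required names have distinct first indices
theorem pvIndex?_ne_of_ne {xs : List String} {u v : String} {i : Nat}
    (huv : u ≠ v) (hu : PySem.List.index? xs u = some i) (hv : PySem.List.index? xs v = some i) : False := by
  obtain ⟨hk, hxu, -⟩ := PySem.List.getElem_of_index?_eq_some hu
  obtain ⟨hk2, hxv, -⟩ := PySem.List.getElem_of_index?_eq_some hv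
  exact huv (hxu ▸ hxv ▸ rfl)

-- A's 'indices == sorted(indices)' on a 3-element list is the two comparisons
theorem pvSorted3 (a b c : Int) :
    ([a, b, c] == PySem.List.sorted [a, b, c] (fun x => x)) = decide (a ≤ b ∧ b ≤ c) := by
  by_cases h : a ≤ b ∧ b ≤ c
  · rw [PySem.List.sorted_eq_self_of_pairwise [a, b, c] (fun x => x)
        (by simp [List.pairwise_cons]; omega)]
    simp [h]
  · simp only [h, decide_false]
    rw [beq_eq_false_iff_ne]
    intro heq
    have hp := PySem.List.sorted_pairwise [a, b, c] (fun x => x)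
    rw [← heq] at hp
    simp [List.pairwise_cons] at hp
    omega

-- ===== VERDICT (by name: the statement is the Claim_ definition above) =====
theorem matches_classic_injection_py_spec : Claim_equal_matches_classic_injection_py := by
  intro xs _
  unfold Spec_matches_classic_injection_py matches_classic_injection_py matches_classic_injection_py_alt
  rw [pvScan_fff]
  rcases hV : PySem.List.index? xs "VirtualAllocEx" with _ | i <;>
    rcases hW : PySem.List.index? xs "WriteProcessMemory" with _ | j <;>
      rcases hC : PySem.List.index? xs "CreateRemoteThread" with _ | k <;>
        simp only [pvCollectIndices, hV, hW, hC, List.nil_append, List.cons_append]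
  have hij : i ≠ j := fun h => pvIndex?_ne_of_ne (by decide) hV (h ▸ hW)
  have hjk : j ≠ k := fun h => pvIndex?_ne_of_ne (by decide) hW (h ▸ hC)
  rw [pvSorted3]
  simp only [decide_eq_decide]
  omega
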